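-- pv_equiv track=rewrite | github.com/lim123456789/programmers | 프로그래머스/2/169199. 리코쳇 로봇/리코쳇 로봇.py | solution
-- ===== SOURCE A (Python) =====
-- from collections import deque
--
-- def solution(board):
--     n, m = len(board), len(board[0])
--
--     directions = [(-1, 0), (1, 0), (0, -1), (0, 1)]
--
--     start = None
--     goal = None
--
--     for i in range(n):
--         for j in range(m):
--             if board[i][j] == 'R':
--                 start = (i, j)
--             elif board[i][j] == 'G':
--                 goal = (i, j)
--
--     queue = deque([(start[0], start[1], 0)])
--     visited = set()
--     visited.add(start)
--
--     while queue:
--         x, y, move_count = queue.popleft()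
--
--         if (x, y) == goal:
--             return move_count
--
--         for dx, dy in directions:
--             nx, ny = x, y
--
--             while 0 <= nx + dx < n and 0 <= ny + dy < m and board[nx + dx][ny + dy] != 'D':
--                 nx += dx
--                 ny += dy
--
--             if (nx, ny) not in visited:
--                 visited.add((nx, ny))
--                 queue.append((nx, ny, move_count + 1))
--
--     return -1
-- ===== SOURCE B (Python) =====
-- def solution(board):
--     n, m = len(board), len(board[0])
--
--     start = None
--     goal = None
--     for i in range(n):
--         for j in range(m):
--             if board[i][j] == 'R':
--                 start = (i, j)
--             elif board[i][j] == 'G':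
--                 goal = (i, j)
--
--     def stops(p):
--         res = []
--         for dx, dy in ((-1, 0), (1, 0), (0, -1), (0, 1)):
--             x, y = p
--             while 0 <= x + dx < n and 0 <= y + dy < m and board[x + dx][y + dy] != 'D':
--                 x += dx
--                 y += dy
--             res.append((x, y))
--         return res
--
--     reach = {start}
--     dist = 0
--     while True:
--         if goal in reach:
--             return dist
--         grown = set(reach)
--         for p in reach:
--             for q in stops(p):
--                 grown.add(q)
--         if len(grown) == len(reach):
--             return -1
--         reach = grown
--         dist += 1
-- ===== Notes on version B (the rewrite author's own statement) =====
-- stated objective: alternative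
-- what changed: Replaces A's queue BFS (a deque of (x,y,dist) triples plus a visited set, goal tested per dequeued node) by a fixed-point iteration of the one-move closure: a single set 'reach' of all cells reachable in at most dist moves, recomputing the slide image of the whole set each round, with no queue and no visited set, terminating when the set stops growing; dist is the first round whose set contains the goal.
import Mathlib
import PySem

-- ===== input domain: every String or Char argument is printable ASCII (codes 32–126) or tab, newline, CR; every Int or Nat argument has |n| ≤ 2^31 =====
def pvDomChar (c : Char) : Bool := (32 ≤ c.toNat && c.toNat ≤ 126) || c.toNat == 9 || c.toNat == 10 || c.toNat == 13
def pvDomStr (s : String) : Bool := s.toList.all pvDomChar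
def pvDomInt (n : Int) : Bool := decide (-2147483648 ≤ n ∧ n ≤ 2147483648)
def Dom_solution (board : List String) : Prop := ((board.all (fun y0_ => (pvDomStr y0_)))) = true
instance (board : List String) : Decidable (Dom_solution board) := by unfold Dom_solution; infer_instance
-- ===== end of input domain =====

-- B replaces A's queue BFS by a fixed-point iteration of the one-move closure of the
-- reachable set (no queue, no visited set); same results, no speed claim (objective: alternative).

-- ===== PORT A =====
-- board[i][j] (none = IndexError); shared by both ports (both index the board the same way)
def pvCellA (board : List String) (i j : Int) : Option Char :=
  (PySem.List.pyGet? board i).bind (fun row => PySem.Str.pyGet? row j)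

-- the double 'for i in range(n): for j in range(m)' scan recording last 'R' and last 'G';
-- identical in A and Source B, so shared by both ports
def pvScanA (board : List String) (n m : Int) :
    Option (Int × Int) × Option (Int × Int) :=
  (PySem.List.pyRange 0 n).foldl (fun st i =>
    (PySem.List.pyRange 0 m).foldl (fun st j =>
      if pvCellA board i j = some 'R' then (some (i, j), st.2)
      else if pvCellA board i j = some 'G' then (st.1, some (i, j))
      else st) st) (none, none)

-- the 'while 0 <= nx+dx < n and 0 <= ny+dy < m and board[..] != "D"' slide loop
-- (textually the same loop in A and in Source B's stops, so shared);
-- fuel n+m bounds the number of single-cell moves (each move stays inside the board)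
def pvSlideA (board : List String) (n m dx dy : Int) : Nat → Int → Int → Int × Int
  | 0, x, y => (x, y)
  | f + 1, x, y =>
    if 0 ≤ x + dx ∧ x + dx < n ∧ 0 ≤ y + dy ∧ y + dy < m ∧
        ¬ pvCellA board (x + dx) (y + dy) = some 'D'
    then pvSlideA board n m dx dy f (x + dx) (y + dy) else (x, y)

def pvDirs : List (Int × Int) := [(-1, 0), (1, 0), (0, -1), (0, 1)]

-- one direction of A's 'for dx, dy in directions' body
def pvStepA (board : List String) (n m x y mc : Int)
    (st : List (Int × Int × Int) × PySem.Set (Int × Int)) (dxy : Int × Int) :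
    List (Int × Int × Int) × PySem.Set (Int × Int) :=
  let p := pvSlideA board n m dxy.1 dxy.2 (n.toNat + m.toNat) x y
  if PySem.Set.contains st.2 p then st
  else (st.1 ++ [(p.1, p.2, mc + 1)], PySem.Set.add st.2 p)

-- A's 'while queue' loop; fuel n*m+1 bounds the dequeues (every enqueue grows visited)
def pvRunA (board : List String) (n m : Int) (g : Option (Int × Int)) :
    Nat → List (Int × Int × Int) → PySem.Set (Int × Int) → Int
  | 0, _, _ => -1
  | _ + 1, [], _ => -1
  | f + 1, (x, y, mc) :: rest, v =>
    if (some (x, y) : Option (Int × Int)) == g then mc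
    else
      let st := pvDirs.foldl (pvStepA board n m x y mc) (rest, v)
      pvRunA board n m g f st.1 st.2

def solution (board : List String) : Int :=
  match PySem.List.pyGet? board 0 with
  | none => -1      -- Python raises IndexError here (board == []); excluded by Pre_
  | some row0 =>
    let n : Int := board.length
    let m : Int := PySem.Str.len row0
    let sg := pvScanA board n m
    match sg.1 with
    | none => -1    -- Python raises TypeError here (no 'R' found); excluded by Pre_
    | some s =>
      pvRunA board n m sg.2 (n.toNat * m.toNat + 1) [(s.1, s.2, 0)]
        (PySem.Set.add PySem.Set.empty s)

-- ===== PORT B =====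
-- Source B's stops(p): the four slide stops of p (res.append over the direction tuple)
def pvStops (board : List String) (n m : Int) (p : Int × Int) : List (Int × Int) :=
  pvDirs.map (fun dxy => pvSlideA board n m dxy.1 dxy.2 (n.toNat + m.toNat) p.1 p.2)

-- Source B's 'grown = set(reach); for p in reach: for q in stops(p): grown.add(q)'
def pvGrow (board : List String) (n m : Int) (reach : PySem.Set (Int × Int)) :
    PySem.Set (Int × Int) :=
  reach.foldl (fun g p => (pvStops board n m p).foldl PySem.Set.add g) reach

-- Source B's 'while True' loop; fuel n*m+1 bounds the rounds (each round grows reach)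
def pvRunC (board : List String) (n m : Int) (g : Option (Int × Int)) :
    Nat → PySem.Set (Int × Int) → Int → Int
  | 0, _, _ => -1
  | f + 1, reach, d =>
    if reach.any (fun p => g == some p) then d
    else
      let grown := pvGrow board n m reach
      if grown.length = reach.length then -1
      else pvRunC board n m g f grown (d + 1)

def solution_alt (board : List String) : Int :=
  match PySem.List.pyGet? board 0 with
  | none => -1      -- Source B raises IndexError here too; excluded by Pre_
  | some row0 =>
    let n : Int := board.length
    let m : Int := PySem.Str.len row0
    let sg := pvScanA board n m
    match sg.1 with
    | none =>       -- Source B: reach = {None}; if goal is also None, 'goal in reach' returns 0;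
                    -- otherwise stops(None) raises TypeError (excluded by Pre_)
      if sg.2 = none then 0 else -1
    | some s =>
      pvRunC board n m sg.2 (n.toNat * m.toNat + 1)
        (PySem.Set.add PySem.Set.empty s) 0

-- ===== PRECONDITION & SPEC =====
-- Pre_ excludes exactly the inputs where A raises: the empty board (IndexError),
-- boards with a row shorter than the first row (IndexError in the scan), and boards
-- with no 'R' among the first len(board[0]) columns (TypeError on start[0]).
def Pre_solution (board : List String) : Prop :=
  board ≠ [] ∧
  (∀ r ∈ board, (board.headD "").toList.length ≤ r.toList.length) ∧
  ∃ r ∈ board, 'R' ∈ r.toList.take (board.headD "").toList.length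

instance (board : List String) : Decidable (Pre_solution board) := by
  unfold Pre_solution; infer_instance

def pvWitness_solution : List String := ["RG"]

def Spec_solution (board : List String) (out : Int) : Prop := out = solution_alt board
instance (board : List String) (out : Int) : Decidable (Spec_solution board out) := by
  unfold Spec_solution; infer_instance

-- ===== CLAIM (what is proved, stated in full; the proofs are below) =====
def Claim_equal_solution : Prop :=
  ∀ (board : List String), Dom_solution board → Pre_solution board →
    Spec_solution board (solution board)


-- ===== LEMMAS AND PROOFS =====

-- a foldl preserves a predicate its step preserves
theorem pvFoldl_pres {α St : Type} (f : St → α → St) (Q : St → Prop) (l : List α)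
    (pres : ∀ s a, Q s → Q (f s a)) : ∀ s, Q s → Q (l.foldl f s) := by
  induction l with
  | nil => intro s hs; exact hs
  | cons a l ih => intro s hs; exact ih _ (pres s a hs)

-- a foldl establishes a predicate once some element of the list forces it
theorem pvFoldl_trigger {α St : Type} (f : St → α → St) (Q : St → Prop) (l : List α)
    (x : α) (hx : x ∈ l) (trig : ∀ s, Q (f s x)) (pres : ∀ s a, Q s → Q (f s a)) :
    ∀ s, Q (l.foldl f s) := by
  induction l with
  | nil => cases hx
  | cons a l ih =>
    intro s
    rcases List.mem_cons.1 hx with rfl | hx'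
    · exact pvFoldl_pres f Q l pres _ (trig s)
    · exact ih hx' _

-- if some in-range cell is 'R', the scan records a start
theorem pvScanA_some (board : List String) (n m : Int) (i j : Int)
    (hi : 0 ≤ i ∧ i < n) (hj : 0 ≤ j ∧ j < m)
    (hc : pvCellA board i j = some 'R') :
    (pvScanA board n m).1.isSome = true := by
  unfold pvScanA
  refine pvFoldl_trigger _ (fun (st : Option (Int × Int) × Option (Int × Int)) => st.1.isSome = true) _ i
    (by rw [PySem.List.mem_pyRange_one]; exact hi) ?_ ?_ _
  · intro s
    refine pvFoldl_trigger _ (fun (st : Option (Int × Int) × Option (Int × Int)) => st.1.isSome = true) _ j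
      (by rw [PySem.List.mem_pyRange_one]; exact hj) ?_ ?_ s
    · intro s'; rw [if_pos hc]; rfl
    · intro s' a hs; split_ifs <;> simp [hs]
  · intro s a hs
    refine pvFoldl_pres _ (fun (st : Option (Int × Int) × Option (Int × Int)) => st.1.isSome = true) _ ?_ s hs
    intro s' a' hs'; split_ifs <;> simp [hs']

-- a position strictly inside the n×m board
def pvInGrid (n m : Int) (p : Int × Int) : Prop :=
  0 ≤ p.1 ∧ p.1 < n ∧ 0 ≤ p.2 ∧ p.2 < m

def pvGridL (n m : Int) : List (Int × Int) :=
  (PySem.List.pyRange 0 n).flatMap (fun i => (PySem.List.pyRange 0 m).map (fun j => (i, j)))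

theorem pvMem_gridL (n m : Int) (p : Int × Int) :
    p ∈ pvGridL n m ↔ pvInGrid n m p := by
  obtain ⟨a, b⟩ := p
  simp [pvGridL, PySem.List.mem_pyRange_one, pvInGrid]
  tauto

theorem pvGridL_length (n m : Int) :
    (pvGridL n m).length = n.toNat * m.toNat := by
  simp [pvGridL, List.length_flatMap, PySem.List.length_pyRange_one]

theorem pvSlideA_grid (board : List String) (n m dx dy : Int) (f : Nat) (x y : Int)
    (h : pvInGrid n m (x, y)) :
    pvInGrid n m (pvSlideA board n m dx dy f x y) := by
  induction f generalizing x y with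
  | zero => exact h
  | succ f ih =>
    simp only [pvSlideA]
    split
    · rename_i hc; exact ih _ _ ⟨hc.1, hc.2.1, hc.2.2.1, hc.2.2.2.1⟩
    · exact h

-- any 'R' the scan records lies inside the board
theorem pvScanA_grid (board : List String) (n m : Int) (s : Int × Int)
    (h : (pvScanA board n m).1 = some s) : pvInGrid n m s := by
  unfold pvScanA at h
  refine List.foldlRecOn
    (motive := fun (st : Option (Int × Int) × Option (Int × Int)) =>
      ∀ p, st.1 = some p → pvInGrid n m p)
    _ _ (by simp) ?_ s h
  intro b hb i hi
  refine List.foldlRecOn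
    (motive := fun (st : Option (Int × Int) × Option (Int × Int)) =>
      ∀ p, st.1 = some p → pvInGrid n m p)
    _ _ hb ?_
  intro b' hb' j hj
  rw [PySem.List.mem_pyRange_one] at hi hj
  intro p hp
  split_ifs at hp with h1 h2
  · cases hp
    exact ⟨hi.1, hi.2, hj.1, hj.2⟩
  · exact hb' p hp
  · exact hb' p hp

def pvEncQ (mc : Int) (p : Int × Int) : Int × Int × Int := (p.1, p.2, mc)

-- proof-side level expansion: A's direction fold on bare positions
def pvStepB (board : List String) (n m : Int) (pos : Int × Int)
    (st : List (Int × Int) × PySem.Set (Int × Int)) (dxy : Int × Int) :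
    List (Int × Int) × PySem.Set (Int × Int) :=
  let p := pvSlideA board n m dxy.1 dxy.2 (n.toNat + m.toNat) pos.1 pos.2
  if PySem.Set.contains st.2 p then st
  else (st.1 ++ [p], PySem.Set.add st.2 p)

def pvPosStep (board : List String) (n m : Int)
    (st : List (Int × Int) × PySem.Set (Int × Int)) (pos : Int × Int) :
    List (Int × Int) × PySem.Set (Int × Int) :=
  pvDirs.foldl (pvStepB board n m pos) st

def pvGoalHit (g : Option (Int × Int)) (fr : List (Int × Int)) : Bool :=
  fr.any (fun p => g == some p)

-- A's direction fold on the tagged queue is the bare-position direction fold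
theorem pvDirFold (board : List String) (n m x y mc : Int) (ds : List (Int × Int)) :
    ∀ (Q : List (Int × Int × Int)) (nxt : List (Int × Int)) (v : PySem.Set (Int × Int)),
    ds.foldl (pvStepA board n m x y mc) (Q ++ nxt.map (pvEncQ (mc + 1)), v) =
      (Q ++ (ds.foldl (pvStepB board n m (x, y)) (nxt, v)).1.map (pvEncQ (mc + 1)),
       (ds.foldl (pvStepB board n m (x, y)) (nxt, v)).2) := by
  induction ds with
  | nil => intro Q nxt v; rfl
  | cons dxy ds ih =>
    intro Q nxt v
    simp only [List.foldl_cons]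
    have hstep : pvStepA board n m x y mc (Q ++ nxt.map (pvEncQ (mc + 1)), v) dxy =
        ((pvStepB board n m (x, y) (nxt, v) dxy).1.map (pvEncQ (mc + 1)) |> (Q ++ ·),
         (pvStepB board n m (x, y) (nxt, v) dxy).2) := by
      simp only [pvStepA, pvStepB]
      split
      · rfl
      · simp [pvEncQ]
    rw [hstep]
    exact ih Q _ _

-- shape of one position's direction fold: it appends the same fresh block to both parts,
-- and every slide stop of the position ends up in the final set
theorem pvDirFold_shape (board : List String) (n m : Int) (pos : Int × Int)
    (hpos : pvInGrid n m pos) (ds : List (Int × Int)) :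
    ∀ (nxt : List (Int × Int)) (v : PySem.Set (Int × Int)),
    ∃ D, ds.foldl (pvStepB board n m pos) (nxt, v) = (nxt ++ D, v ++ D) ∧
      D.Nodup ∧ (∀ q ∈ D, q ∉ v) ∧ (∀ q ∈ D, pvInGrid n m q) ∧
      (∀ dxy ∈ ds,
        pvSlideA board n m dxy.1 dxy.2 (n.toNat + m.toNat) pos.1 pos.2 ∈ v ++ D) := by
  induction ds with
  | nil => intro nxt v; exact ⟨[], by simp⟩
  | cons dxy ds ih =>
    intro nxt v
    simp only [List.foldl_cons, pvStepB]
    set p := pvSlideA board n m dxy.1 dxy.2 (n.toNat + m.toNat) pos.1 pos.2 with hp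
    have hpg : pvInGrid n m p := pvSlideA_grid _ _ _ _ _ _ _ _ hpos
    by_cases hc : p ∈ v
    · rw [if_pos (by rwa [PySem.Set.contains_iff])]
      obtain ⟨D, hD, hnd, hfr, hg, hst⟩ := ih nxt v
      refine ⟨D, hD, hnd, hfr, hg, ?_⟩
      intro d hd
      rcases List.mem_cons.1 hd with rfl | hd
      · exact List.mem_append.2 (Or.inl hc)
      · exact hst d hd
    · rw [if_neg (by rw [PySem.Set.contains_iff]; exact hc),
          PySem.Set.add_of_not_mem hc]
      obtain ⟨D, hD, hnd, hfr, hg, hst⟩ := ih (nxt ++ [p]) (v ++ [p])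
      refine ⟨p :: D, ?_, ?_, ?_, ?_, ?_⟩
      · simpa using hD
      · exact List.nodup_cons.2 ⟨fun hm' => (hfr p hm') (by simp), hnd⟩
      · intro q hq
        rcases List.mem_cons.1 hq with rfl | hq
        · exact hc
        · exact fun hv => hfr q hq (by simp [hv])
      · intro q hq
        rcases List.mem_cons.1 hq with rfl | hq
        · exact hpg
        · exact hg q hq
      · intro d hd
        rcases List.mem_cons.1 hd with rfl | hd
        · simp [hp]
        · have h2 := hst d hd
          simpa [List.append_assoc] using h2
  
-- shape of a whole level's fold
theorem pvLevelFold_shape (board : List String) (n m : Int) (fr : List (Int × Int))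
    (hfr : ∀ p ∈ fr, pvInGrid n m p) :
    ∀ (nxt : List (Int × Int)) (v : PySem.Set (Int × Int)),
    ∃ D, fr.foldl (pvPosStep board n m) (nxt, v) = (nxt ++ D, v ++ D) ∧
      D.Nodup ∧ (∀ q ∈ D, q ∉ v) ∧ (∀ q ∈ D, pvInGrid n m q) ∧
      (∀ p ∈ fr, ∀ dxy ∈ pvDirs,
        pvSlideA board n m dxy.1 dxy.2 (n.toNat + m.toNat) p.1 p.2 ∈ v ++ D) := by
  induction fr with
  | nil => intro nxt v; exact ⟨[], by simp⟩
  | cons pos fr ih =>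
    intro nxt v
    simp only [List.foldl_cons]
    obtain ⟨D1, hD1, hnd1, hfr1, hg1, hst1⟩ :=
      pvDirFold_shape board n m pos (hfr pos (by simp)) pvDirs nxt v
    unfold pvPosStep
    rw [hD1]
    obtain ⟨D2, hD2, hnd2, hfr2, hg2, hst2⟩ :=
      ih (fun p hp => hfr p (by simp [hp])) (nxt ++ D1) (v ++ D1)
    refine ⟨D1 ++ D2, by simpa using hD2, ?_, ?_, ?_, ?_⟩
    · exact List.Nodup.append hnd1 hnd2
        (fun q hq1 hq2 => hfr2 q hq2 (by simp [hq1]))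
    · intro q hq
      rcases List.mem_append.1 hq with hq | hq
      · exact hfr1 q hq
      · exact fun hv => hfr2 q hq (by simp [hv])
    · intro q hq
      rcases List.mem_append.1 hq with hq | hq
      · exact hg1 q hq
      · exact hg2 q hq
    · intro p hp dxy hd
      rcases List.mem_cons.1 hp with rfl | hp
      · have h := hst1 dxy hd
        rcases List.mem_append.1 h with h | h
        · exact List.mem_append.2 (Or.inl h)
        · exact List.mem_append.2 (Or.inr (List.mem_append.2 (Or.inl h)))
      · have := hst2 p hp dxy hd
        simpa [List.append_assoc] using this

-- A's queue loop, processing one whole distance level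
theorem pvProcessA (board : List String) (n m : Int) (g : Option (Int × Int)) (d : Int)
    (L : List (Int × Int)) :
    ∀ (fa : Nat) (nxt : List (Int × Int)) (v : PySem.Set (Int × Int)),
    L.length ≤ fa →
    pvRunA board n m g fa (L.map (pvEncQ d) ++ nxt.map (pvEncQ (d + 1))) v =
      (if pvGoalHit g L then d
       else pvRunA board n m g (fa - L.length)
         ((L.foldl (pvPosStep board n m) (nxt, v)).1.map (pvEncQ (d + 1)))
         (L.foldl (pvPosStep board n m) (nxt, v)).2) := by
  induction L with
  | nil => intro fa nxt v _; simp [pvGoalHit]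
  | cons p rest ih =>
    intro fa nxt v hfa
    obtain ⟨fb, rfl⟩ : ∃ fb, fa = fb + 1 := by
      cases fa with
      | zero => simp at hfa
      | succ k => exact ⟨k, rfl⟩
    have hfb : rest.length ≤ fb := by simpa using hfa
    simp only [List.map_cons, List.cons_append, pvEncQ, pvRunA]
    have hcond : ((some (p.1, p.2) : Option (Int × Int)) == g) = (g == some p) := by
      rw [Prod.mk.eta, Bool.beq_comm]
    rw [hcond]
    have hhit : pvGoalHit g (p :: rest) = ((g == some p) || pvGoalHit g rest) := by
      simp [pvGoalHit]
    rw [hhit]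
    cases hgp : (g == some p) with
    | true => simp
    | false =>
      simp only [Bool.false_or, if_false, Bool.false_eq_true]
      have := pvDirFold board n m p.1 p.2 d pvDirs (rest.map (pvEncQ d)) nxt v
      rw [this]
      have hfold : pvDirs.foldl (pvStepB board n m (p.1, p.2)) (nxt, v) =
          pvPosStep board n m (nxt, v) p := by
        rw [Prod.mk.eta]; rfl
      rw [hfold]
      have := ih fb (pvPosStep board n m (nxt, v) p).1 (pvPosStep board n m (nxt, v) p).2 hfb
      rw [this]
      simp only [List.foldl_cons, List.length_cons]
      have : fb + 1 - (rest.length + 1) = fb - rest.length := by omega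
      rw [this]

-- one pvStepB step changes the set part exactly like Set.add of the slide stop
theorem pvStepB_snd (board : List String) (n m : Int) (pos : Int × Int)
    (st : List (Int × Int) × PySem.Set (Int × Int)) (dxy : Int × Int) :
    (pvStepB board n m pos st dxy).2 =
      PySem.Set.add st.2 (pvSlideA board n m dxy.1 dxy.2 (n.toNat + m.toNat) pos.1 pos.2) := by
  simp only [pvStepB]
  by_cases hc : (pvSlideA board n m dxy.1 dxy.2 (n.toNat + m.toNat) pos.1 pos.2) ∈ st.2
  · rw [if_pos (by rwa [PySem.Set.contains_iff]), PySem.Set.add_of_mem hc]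
  · rw [if_neg (by rw [PySem.Set.contains_iff]; exact hc), PySem.Set.add_of_not_mem hc]

-- the set part of the direction fold is the add-fold of the stops
theorem pvDirFold_snd (board : List String) (n m : Int) (pos : Int × Int)
    (ds : List (Int × Int)) :
    ∀ (st : List (Int × Int) × PySem.Set (Int × Int)),
    (ds.foldl (pvStepB board n m pos) st).2 =
      (ds.map (fun dxy =>
        pvSlideA board n m dxy.1 dxy.2 (n.toNat + m.toNat) pos.1 pos.2)).foldl
        PySem.Set.add st.2 := by
  induction ds with
  | nil => intro st; rfl
  | cons dxy ds ih =>
    intro st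
    simp only [List.foldl_cons, List.map_cons]
    rw [ih]
    congr 1
    exact pvStepB_snd board n m pos st dxy

-- the set part of the level fold is Source B's inner double loop starting from the set part
theorem pvLevelFold_snd (board : List String) (n m : Int) (fr : List (Int × Int)) :
    ∀ (st : List (Int × Int) × PySem.Set (Int × Int)),
    (fr.foldl (pvPosStep board n m) st).2 =
      fr.foldl (fun g p => (pvStops board n m p).foldl PySem.Set.add g) st.2 := by
  induction fr with
  | nil => intro st; rfl
  | cons pos fr ih =>
    intro st
    simp only [List.foldl_cons]
    rw [ih]
    congr 1
    rw [pvPosStep, pvDirFold_snd]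
    rfl

-- folding add over elements already in the set is a no-op
theorem pvAddFold_noop {α : Type} [BEq α] [LawfulBEq α] (qs : List α) :
    ∀ (v : PySem.Set α), (∀ q ∈ qs, q ∈ v) → qs.foldl PySem.Set.add v = v := by
  induction qs with
  | nil => intro v _; rfl
  | cons q qs ih =>
    intro v h
    simp only [List.foldl_cons]
    rw [PySem.Set.add_of_mem (h q (by simp))]
    exact ih v (fun q' hq' => h q' (by simp [hq']))

-- adding stops of already-processed nodes whose stops are in the set is a no-op
theorem pvGrow_prefix (board : List String) (n m : Int) (P : List (Int × Int)) :
    ∀ (v : PySem.Set (Int × Int)),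
    (∀ p ∈ P, ∀ q ∈ pvStops board n m p, q ∈ v) →
    P.foldl (fun g p => (pvStops board n m p).foldl PySem.Set.add g) v = v := by
  induction P with
  | nil => intro v _; rfl
  | cons p P ih =>
    intro v hP
    simp only [List.foldl_cons]
    rw [pvAddFold_noop _ v (hP p (by simp))]
    exact ih v (fun p' hp' => hP p' (by simp [hp']))

-- the key identity: pvGrow on visited = (level fold over the frontier).2
theorem pvGrow_eq (board : List String) (n m : Int) (P L : List (Int × Int))
    (hP : ∀ p ∈ P, ∀ q ∈ pvStops board n m p, q ∈ P ++ L) :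
    pvGrow board n m (P ++ L) =
      ((P ++ L).length, ((L.foldl (pvPosStep board n m) ([], P ++ L)).2)).2 := by
  simp only
  rw [pvLevelFold_snd]
  unfold pvGrow
  rw [List.foldl_append]
  rw [pvGrow_prefix board n m P (P ++ L) hP]

-- the main level-by-level correspondence between A's queue loop and Source B's closure loop
theorem pvMainC (board : List String) (n m : Int) (g : Option (Int × Int)) :
    ∀ (fa fc : Nat) (P L : List (Int × Int)) (d : Int),
    (P ++ L).Nodup → (∀ q ∈ P ++ L, pvInGrid n m q) →
    (∀ p ∈ P, ∀ q ∈ pvStops board n m p, q ∈ P ++ L) →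
    pvGoalHit g P = false →
    L.length + n.toNat * m.toNat + 1 ≤ fa + (P ++ L).length →
    n.toNat * m.toNat + 2 ≤ fc + (P ++ L).length →
    pvRunA board n m g fa (L.map (pvEncQ d)) (P ++ L) =
      pvRunC board n m g fc (P ++ L) d := by
  intro fa
  induction fa using Nat.strong_induction_on with
  | _ fa IH =>
    intro fc P L d hnd hg hP hPgoal hfa hfc
    have hvcard : (P ++ L).length ≤ n.toNat * m.toNat := by
      have hsub : (P ++ L).Subperm (pvGridL n m) :=
        hnd.subperm (fun q hq => (pvMem_gridL n m q).2 (hg q hq))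
      have := hsub.length_le
      rwa [pvGridL_length] at this
    obtain ⟨fc', rfl⟩ : ∃ k, fc = k + 1 := ⟨fc - 1, by omega⟩
    have hLlen : L.length ≤ fa := by omega
    have hPA := pvProcessA board n m g d L fa [] (P ++ L) hLlen
    simp only [List.map_nil, List.append_nil] at hPA
    rw [hPA]
    rw [pvRunC]
    have hreachhit : (P ++ L).any (fun p => g == some p) = pvGoalHit g L := by
      show pvGoalHit g (P ++ L) = pvGoalHit g L
      unfold pvGoalHit at hPgoal ⊢
      rw [List.any_append, hPgoal, Bool.false_or]
    rw [hreachhit]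
    cases hhit : pvGoalHit g L with
    | true => simp
    | false =>
      simp only [Bool.false_eq_true, if_false]
      obtain ⟨D, hD, hDnd, hDfr, hDg, hDst⟩ :=
        pvLevelFold_shape board n m L (fun p hp => hg p (by simp [hp])) [] (P ++ L)
      have hgrow : pvGrow board n m (P ++ L) = (P ++ L) ++ D := by
        rw [pvGrow_eq board n m P L hP]
        simp only [hD]
      rw [hgrow, hD]
      simp only [List.nil_append, List.length_append]
      by_cases hDnil : D = []
      · subst hDnil
        simp only [List.length_nil, Nat.add_zero, if_true]
        obtain ⟨k, hk⟩ : ∃ k, fa - L.length = k + 1 := ⟨fa - L.length - 1, by omega⟩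
        rw [hk]
        rfl
      · rw [if_neg (by have := List.length_pos_iff.2 hDnil; omega)]
        have hL1 : 1 ≤ L.length := by
          rcases L with _ | ⟨p, L⟩
          · exfalso; apply hDnil
            have := congrArg Prod.fst hD
            simpa using this.symm
          · simp
        have hnd' : ((P ++ L) ++ D).Nodup :=
          List.Nodup.append hnd hDnd (fun q hq1 hq2 => hDfr q hq2 hq1)
        -- apply IH with P' := P ++ L, L' := D
        have happ := IH (fa - L.length) (by omega) fc' (P ++ L) D (d + 1)
          (by simpa [List.append_assoc] using hnd')
          (by intro q hq
              rcases List.mem_append.1 hq with hq | hq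
              · exact hg q hq
              · exact hDg q hq)
          (by intro p hp q hq
              have : q ∈ (P ++ L) ++ D := by
                rcases List.mem_append.1 hp with hp | hp
                · exact List.mem_append.2 (Or.inl (hP p hp q hq))
                · -- p ∈ L: q is one of its slide stops
                  obtain ⟨dxy, hdxy, rfl⟩ := List.mem_map.1 hq
                  exact hDst p hp dxy hdxy
              exact this)
          (by unfold pvGoalHit at hPgoal hhit ⊢
              rw [List.any_append, hPgoal, hhit]
              rfl)
          (by simp only [List.length_append] at hvcard ⊢
              have hDpos : 1 ≤ D.length := List.length_pos_iff.2 hDnil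
              -- need: D.length + n*m + 1 ≤ (fa - L.length) + (P.length + L.length + D.length)
              have hcard' : P.length + L.length + D.length ≤ n.toNat * m.toNat := by
                have hsub : ((P ++ L) ++ D).Subperm (pvGridL n m) :=
                  hnd'.subperm (fun q hq => (pvMem_gridL n m q).2 (by
                    rcases List.mem_append.1 hq with hq | hq
                    · exact hg q hq
                    · exact hDg q hq))
                have := hsub.length_le
                rw [pvGridL_length] at this
                simp only [List.length_append] at this
                omega
              simp only [List.length_append] at hfa
              omega)
          (by have hDpos : 1 ≤ D.length := List.length_pos_iff.2 hDnil
              simp only [List.length_append] at hfc ⊢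
              omega)
        simpa [List.append_assoc] using happ

-- ===== VERDICT (by name: the statement is the Claim_ definition above) =====
theorem solution_spec : Claim_equal_solution := by
  unfold Claim_equal_solution Spec_solution
  intro board _ hpre
  obtain ⟨hne, hrows, hR⟩ := hpre
  obtain ⟨r0, rs, rfl⟩ : ∃ r0 rs, board = r0 :: rs := by
    cases board with
    | nil => exact absurd rfl hne
    | cons a b => exact ⟨a, b, rfl⟩
  have h0 : PySem.List.pyGet? (r0 :: rs) 0 = some r0 := by
    have h := PySem.List.pyGet?_natCast (r0 :: rs) 0
    simp only [Nat.cast_zero, List.getElem?_cons_zero] at h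
    exact h
  simp only [solution, solution_alt, h0, PySem.Str.len_eq]
  cases hs : (pvScanA (r0 :: rs) ((r0 :: rs).length : Int) (r0.toList.length : Int)).1 with
  | none =>
    exfalso
    obtain ⟨r, hr, hRr⟩ := hR
    obtain ⟨i0, hi0, hri⟩ := List.mem_iff_getElem.1 hr
    obtain ⟨j0, hj0, hRj⟩ := List.mem_iff_getElem.1 hRr
    have hj0m : j0 < r0.toList.length := by
      simp only [List.headD_cons, List.length_take] at hj0
      omega
    have hj0r : j0 < r.toList.length := by
      have := hrows r hr
      simp only [List.headD_cons] at this
      omega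
    have hcell : pvCellA (r0 :: rs) (i0 : Int) (j0 : Int) = some 'R' := by
      unfold pvCellA
      rw [PySem.List.pyGet?_natCast]
      rw [List.getElem?_eq_getElem hi0, hri]
      simp only [Option.bind_some, PySem.Str.pyGet?, PySem.Chars.pyGet?,
        PySem.List.pyGet?_natCast]
      rw [List.getElem?_eq_getElem hj0r]
      have hval : r.toList[j0] = 'R' := by
        have ht := List.getElem_take (xs := r.toList)
          (i := j0) (j := ((r0 :: rs).headD "").toList.length) (h := hj0)
        simp only [List.headD_cons] at ht hRj
        rw [← ht]; exact hRj
      simp [hval]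
    have := pvScanA_some (r0 :: rs) ((r0 :: rs).length : Int) (r0.toList.length : Int)
      (i0 : Int) (j0 : Int)
      (by constructor <;> [positivity; exact_mod_cast hi0])
      (by constructor <;> [positivity; exact_mod_cast hj0m]) hcell
    rw [hs] at this
    simp at this
  | some s =>
    dsimp only
    have hsg := pvScanA_grid _ _ _ _ hs
    have hv1 : PySem.Set.add (PySem.Set.empty) s = [s] := rfl
    rw [hv1]
    have hq : [(s.1, s.2, (0 : Int))] = [s].map (pvEncQ 0) := rfl
    rw [hq]
    have := pvMainC (r0 :: rs) ((r0 :: rs).length : Int) (r0.toList.length : Int)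
      (pvScanA (r0 :: rs) ((r0 :: rs).length : Int) (r0.toList.length : Int)).2
      ((r0 :: rs).length * r0.toList.length + 1)
      ((r0 :: rs).length * r0.toList.length + 1)
      [] [s] 0 (by simp) (by intro q hq'; simp at hq'; subst hq'; exact hsg)
      (by intro p hp; simp at hp) rfl
      (by simp; omega) (by simp)
    simpa using this
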